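-- pv_equiv track=rewrite | github.com/v-t-9/PythonPuzzles | ex47.py | filter_digits
-- ===== SOURCE A (Python) =====
-- def filter_digits(l):
--      res =[]
--      for num in l:
--         neg = num < 0
--         if neg:
--             v1 = int(str(num)[1])
--         num = str(abs(num))
--         sum_n = sum(int(i) for i in num)
--         if neg:
--             sum_n = sum_n - 2*v1
--         res.append(sum_n)
--      return res
-- ===== SOURCE B (Python) =====
-- def filter_digits(l):
--     res = []
--     for num in l:
--         n = abs(num)
--         s = 0
--         msb = 0
--         while n:
--             n, d = divmod(n, 10)
--             s += d
--             msb = d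
--         if num < 0:
--             s -= 2 * msb
--         res.append(s)
--     return res
-- ===== Notes on version B (the rewrite author's own statement) =====
-- stated objective: faster
-- what changed: Replaces per-number string conversion and per-character int() parsing with an arithmetic divmod(n,10) loop that accumulates the digit sum and keeps the last emitted digit as the most significant one for the negative-sign adjustment.
import Mathlib
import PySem

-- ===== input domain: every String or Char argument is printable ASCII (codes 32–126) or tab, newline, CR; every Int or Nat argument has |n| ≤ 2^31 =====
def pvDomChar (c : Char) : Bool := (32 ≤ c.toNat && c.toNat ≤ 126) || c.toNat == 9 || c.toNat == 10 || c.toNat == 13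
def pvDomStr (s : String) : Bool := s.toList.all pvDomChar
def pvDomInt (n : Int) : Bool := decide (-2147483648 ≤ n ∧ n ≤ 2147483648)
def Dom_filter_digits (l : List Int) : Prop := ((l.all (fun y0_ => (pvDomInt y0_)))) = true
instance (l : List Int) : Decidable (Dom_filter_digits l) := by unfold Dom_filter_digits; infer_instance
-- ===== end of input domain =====

-- B replaces per-number string conversion and per-character int() parsing with an arithmetic
-- divmod(n,10) digit loop (last emitted digit = the most significant one); measurably faster by a constant factor.

-- ===== PORT A =====
-- 'v1' is only consumed when num < 0; then str(num)[1] exists and is a digit char, so the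
-- '.getD' defaults below are unreachable (they only totalize the Option).
def filter_digits (l : List Int) : List Int :=
  l.foldl (fun res num =>
    let neg : Bool := decide (num < 0)
    let v1 : Int := (PySem.Int.ofChars? [(PySem.Str.pyGet? (PySem.Int.toStr num) 1).getD ' ']).getD 0
    let s : List Char := (PySem.Int.toStr ((num.natAbs : Int))).toList
    let sum_n : Int := (s.map (fun i => (PySem.Int.ofChars? [i]).getD 0)).sum
    let sum_n := if neg then sum_n - 2 * v1 else sum_n
    res ++ [sum_n]) []

-- ===== PORT B =====
-- while n: n, d = divmod(n, 10); s += d; msb = d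
def dsLoop (n : Nat) (s msb : Int) : Int × Int :=
  if n = 0 then (s, msb)
  else dsLoop (n / 10) (s + ((n % 10 : Nat) : Int)) ((n % 10 : Nat) : Int)
termination_by n
decreasing_by exact Nat.div_lt_self (Nat.pos_of_ne_zero (by assumption)) (by omega)

def filter_digits_alt (l : List Int) : List Int :=
  l.foldl (fun res num =>
    let p := dsLoop num.natAbs 0 0
    let s := if num < 0 then p.1 - 2 * p.2 else p.1
    res ++ [s]) []

-- ===== PRECONDITION & SPEC =====
def Spec_filter_digits (l : List Int) (out : List Int) : Prop := out = filter_digits_alt l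
instance (l : List Int) (out : List Int) : Decidable (Spec_filter_digits l out) := by unfold Spec_filter_digits; infer_instance

-- ===== CLAIM (what is proved, stated in full; the proofs are below) =====
def Claim_equal_filter_digits : Prop := ∀ (l : List Int), Dom_filter_digits l → Spec_filter_digits l (filter_digits l)

-- ===== LEMMAS AND PROOFS =====

-- decimal representation of n (most significant digit first), digit sum, most significant digit
def decRep (n : Nat) : List Char :=
  if n < 10 then [Nat.digitChar n]
  else decRep (n / 10) ++ [Nat.digitChar (n % 10)]
termination_by n
decreasing_by exact Nat.div_lt_self (by omega) (by omega)

def ds (n : Nat) : Int :=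
  if n < 10 then (n : Int)
  else ds (n / 10) + ((n % 10 : Nat) : Int)
termination_by n
decreasing_by exact Nat.div_lt_self (by omega) (by omega)

def msd (n : Nat) : Nat :=
  if n < 10 then n else msd (n / 10)
termination_by n
decreasing_by exact Nat.div_lt_self (by omega) (by omega)

lemma toDigitsCore_eq_decRep : ∀ (f n : Nat) (acc : List Char), n < f →
    Nat.toDigitsCore 10 f n acc = decRep n ++ acc := by
  intro f
  induction f with
  | zero => intro n acc h; omega
  | succ f ih =>
    intro n acc h
    rw [decRep]
    simp only [Nat.toDigitsCore]
    by_cases h10 : n < 10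
    · have : n / 10 = 0 := Nat.div_eq_of_lt h10
      simp [this, Nat.mod_eq_of_lt h10, h10]
    · have hne : ¬ n / 10 = 0 := by omega
      simp only [h10, hne, if_false]
      rw [ih (n / 10) _ (by omega)]
      simp

lemma toDigits10_eq (n : Nat) : Nat.toDigits 10 n = decRep n := by
  unfold Nat.toDigits
  simpa using toDigitsCore_eq_decRep (n+1) n [] (by omega)

lemma ofChars_digitChar (d : Nat) (h : d < 10) :
    PySem.Int.ofChars? [Nat.digitChar d] = some (d : Int) := by
  interval_cases d <;> decide

lemma decRep_sum (n : Nat) :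
    ((decRep n).map (fun i => (PySem.Int.ofChars? [i]).getD 0)).sum = ds n := by
  induction n using Nat.strong_induction_on with
  | _ n ih =>
    rw [decRep, ds]
    by_cases h : n < 10
    · simp [h, ofChars_digitChar n h]
    · simp only [h, if_false]
      rw [List.map_append, List.sum_append, ih (n / 10) (Nat.div_lt_self (by omega) (by omega))]
      simp [ofChars_digitChar (n % 10) (Nat.mod_lt _ (by omega))]

lemma msd_lt (n : Nat) : msd n < 10 := by
  induction n using Nat.strong_induction_on with
  | _ n ih =>
    rw [msd]
    by_cases h : n < 10
    · simp [h]
    · simpa [h] using ih (n / 10) (Nat.div_lt_self (by omega) (by omega))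

lemma decRep_ne_nil (n : Nat) : decRep n ≠ [] := by
  rw [decRep]; by_cases h : n < 10 <;> simp [h]

lemma decRep_head (n : Nat) : (decRep n).head? = some (Nat.digitChar (msd n)) := by
  induction n using Nat.strong_induction_on with
  | _ n ih =>
    rw [decRep, msd]
    by_cases h : n < 10
    · simp [h]
    · simp only [h, if_false]
      rw [List.head?_append_of_ne_nil _ (decRep_ne_nil _)]
      exact ih (n / 10) (Nat.div_lt_self (by omega) (by omega))

lemma dsLoop_spec (n : Nat) (h : 0 < n) : ∀ (s m : Int), dsLoop n s m = (s + ds n, ((msd n : Nat) : Int)) := by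
  induction n using Nat.strong_induction_on with
  | _ n ih =>
    intro s m
    rw [dsLoop, ds, msd]
    by_cases h10 : n < 10
    · have : n / 10 = 0 := Nat.div_eq_of_lt h10
      rw [if_neg (by omega), dsLoop, if_pos this]
      simp [h10, Nat.mod_eq_of_lt h10]
    · rw [if_neg (by omega), ih (n / 10) (Nat.div_lt_self (by omega) (by omega)) (by omega)]
      simp only [h10, if_false]
      refine Prod.ext ?_ rfl
      push_cast; ring

lemma dsLoop_fst (n : Nat) : (dsLoop n 0 0).1 = ds n := by
  by_cases h : n = 0
  · subst h; rw [dsLoop]; simp [ds]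
  · rw [dsLoop_spec n (by omega)]; simp

lemma toChars_natAbs (num : Int) : PySem.Int.toChars ((num.natAbs : Nat) : Int) = decRep num.natAbs := by
  simp [PySem.Int.toChars, toDigits10_eq, not_lt.mpr (abs_nonneg num)]
  rw [Int.abs_eq_natAbs, Int.toNat_natCast]

lemma elem_eq (num : Int) :
    (let neg : Bool := decide (num < 0)
     let v1 : Int := (PySem.Int.ofChars? [(PySem.Str.pyGet? (PySem.Int.toStr num) 1).getD ' ']).getD 0
     let s : List Char := (PySem.Int.toStr ((num.natAbs : Int))).toList
     let sum_n : Int := (s.map (fun i => (PySem.Int.ofChars? [i]).getD 0)).sum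
     if neg then sum_n - 2 * v1 else sum_n)
    = (let p := dsLoop num.natAbs 0 0
       if num < 0 then p.1 - 2 * p.2 else p.1) := by
  simp only [PySem.Int.toList_toStr, toChars_natAbs, decRep_sum]
  by_cases hneg : num < 0
  · have hpos : 0 < num.natAbs := by omega
    rw [dsLoop_spec _ hpos]
    have hchars : PySem.Int.toChars num = '-' :: decRep num.natAbs := by
      simp [PySem.Int.toChars, hneg, toDigits10_eq]
    simp only [PySem.Str.pyGet?, PySem.Int.toList_toStr, hchars, hneg, decide_true, if_pos]
    have : PySem.Chars.pyGet? ('-' :: decRep num.natAbs) 1 = (decRep num.natAbs).head? := by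
      simp [PySem.Chars.pyGet?, PySem.List.pyGet?]
      cases h : decRep num.natAbs with
      | nil => exact absurd h (decRep_ne_nil _)
      | cons a t => simp [PySem.List.pyIdx?]
    rw [this, decRep_head]
    simp [ofChars_digitChar _ (msd_lt _)]
  · simp [hneg, dsLoop_fst]

-- ===== VERDICT (by name: the statement is the Claim_ definition above) =====
theorem filter_digits_spec : Claim_equal_filter_digits := by
  intro l _
  unfold Spec_filter_digits filter_digits filter_digits_alt
  rw [PySem.List.foldl_append_singleton_eq_map, PySem.List.foldl_append_singleton_eq_map]
  simp only [List.nil_append]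
  exact List.map_congr_left (fun num _ => elem_eq num)
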